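-- pv_equiv track=rewrite | github.com/Anshuman-UCSB/everybody.codes | 2024/python/1/main.py | part2
-- ===== SOURCE A (Python) =====
-- def part2(inp, group_size=2):
--     mapping = {"A": 0, "B": 1, "C": 3, "D": 5, "x": 0}
--
--     ans = 0
--     for i in range(0, len(inp), group_size):
--         sub = inp[i : i + group_size]
--         mobs = len(sub) - sub.count("x")
--         pot = sum(mapping[c] for c in sub)
--         if mobs == 2:
--             pot += group_size - 1
--         if mobs == 3:
--             pot += 3 * (group_size - 1)
--         ans += pot
--     return ans
-- ===== SOURCE B (Python) =====
-- def part2(inp, group_size=2):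
--     values = {"A": 0, "B": 1, "C": 3, "D": 5, "x": 0}
--     # streaming state machine: one pass over the characters, no slicing, no range;
--     # (mobs, pos) track the current group, finalized at each group boundary
--     total = 0
--     mobs = 0
--     pos = 0
--     for c in inp:
--         total += values[c]
--         if c != "x":
--             mobs += 1
--         pos += 1
--         if pos == group_size:
--             if mobs == 2:
--                 total += group_size - 1
--             elif mobs == 3:
--                 total += 3 * (group_size - 1)
--             mobs = 0
--             pos = 0
--     if pos:
--         if mobs == 2:
--             total += group_size - 1
--         elif mobs == 3:
--             total += 3 * (group_size - 1)
--     return total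
-- ===== Notes on version B (the rewrite author's own statement) =====
-- stated objective: alternative
-- what changed: A iterates over group start indices, slicing each group out of the string and summing/counting inside the slice; B is a single streaming state machine over the characters with no slicing or range arithmetic: it carries (total, mobs, pos) and finalizes the bonus whenever pos reaches group_size, plus once at the end for a short final group.
-- outside the precondition, e.g. on part2('D', -1): A returns 0, B returns 5; on part2('E', -1): A returns 0, B raises KeyError
import Mathlib
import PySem

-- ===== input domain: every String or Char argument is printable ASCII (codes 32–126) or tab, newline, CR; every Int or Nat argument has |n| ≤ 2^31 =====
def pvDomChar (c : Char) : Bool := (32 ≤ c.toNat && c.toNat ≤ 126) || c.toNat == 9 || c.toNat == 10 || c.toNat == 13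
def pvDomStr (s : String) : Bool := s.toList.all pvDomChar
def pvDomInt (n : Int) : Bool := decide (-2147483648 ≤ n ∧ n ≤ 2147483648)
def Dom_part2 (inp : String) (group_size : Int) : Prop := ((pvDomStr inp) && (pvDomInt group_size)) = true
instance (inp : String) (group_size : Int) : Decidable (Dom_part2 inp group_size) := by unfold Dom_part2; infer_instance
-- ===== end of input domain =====

-- B replaces A's group-slicing loop over start indices by a single streaming state machine
-- over the characters (alternative decomposition, same cost).

-- ===== PORT A =====
-- mapping = {"A": 0, "B": 1, "C": 3, "D": 5, "x": 0}
def pvMapping : PySem.Dict Char Int :=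
  PySem.Dict.mk [('A', 0), ('B', 1), ('C', 3), ('D', 5), ('x', 0)]

-- literal port of A's fused loop; under Pre_ every character is a mapping key, so
-- mapping[c] (KeyError otherwise) is ported as getD with default 0
def part2 (inp : String) (group_size : Int) : Int :=
  let cs := inp.toList
  (PySem.List.pyRange 0 (cs.length : Int) group_size).foldl
    (fun ans i =>
      let sub := PySem.List.slice cs (some i) (some (i + group_size))
      let mobs : Int := (sub.length : Int) - (PySem.List.count sub 'x' : Int)
      let pot := (sub.map (fun c => pvMapping.getD c 0)).sum
      let pot := if mobs == 2 then pot + (group_size - 1) else pot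
      let pot := if mobs == 3 then pot + 3 * (group_size - 1) else pot
      ans + pot) 0

-- ===== PORT B =====
-- Source B's values dict is the same mapping constant
-- streaming state machine: state (total, mobs, pos), finalized at each group boundary
-- and once at the end for a short final group
def part2_alt (inp : String) (group_size : Int) : Int :=
  let st := inp.toList.foldl
    (fun (s : Int × Int × Int) c =>
      let total := s.1 + pvMapping.getD c 0
      let mobs := if c != 'x' then s.2.1 + 1 else s.2.1
      let pos := s.2.2 + 1
      if pos == group_size then
        let total := if mobs == 2 then total + (group_size - 1)
                     else if mobs == 3 then total + 3 * (group_size - 1)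
                     else total
        (total, 0, 0)
      else (total, mobs, pos)) (0, 0, 0)
  if st.2.2 != 0 then
    if st.2.1 == 2 then st.1 + (group_size - 1)
    else if st.2.1 == 3 then st.1 + 3 * (group_size - 1)
    else st.1
  else st.1

-- ===== PRECONDITION & SPEC =====
-- Pre_ excludes non-positive group_size (step 0 makes A's range raise ValueError; for a
-- negative step A returns 0 without ever reading the characters — an unspecified corner
-- where B's streaming pass does read them) and characters outside the mapping, on which
-- A raises KeyError whenever a group is formed.
def Pre_part2 (inp : String) (group_size : Int) : Prop :=
  1 ≤ group_size ∧ inp.toList.all (fun c => c ∈ (['A', 'B', 'C', 'D', 'x'] : List Char)) = true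
instance (inp : String) (group_size : Int) : Decidable (Pre_part2 inp group_size) := by
  unfold Pre_part2; infer_instance

def pvWitness_part2 : String × Int := ("ABxDCx", 2)

def Spec_part2 (inp : String) (group_size : Int) (out : Int) : Prop := out = part2_alt inp group_size
instance (inp : String) (group_size : Int) (out : Int) : Decidable (Spec_part2 inp group_size out) := by unfold Spec_part2; infer_instance

-- ===== CLAIM (what is proved, stated in full; the proofs are below) =====
def Claim_equal_part2 : Prop := ∀ (inp : String) (group_size : Int), Dom_part2 inp group_size → Pre_part2 inp group_size → Spec_part2 inp group_size (part2 inp group_size)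

-- ===== LEMMAS AND PROOFS =====

-- proof-only names for B's loop body and final fix-up (definitionally the port's lambdas)
def pvStep (gs : Int) (s : Int × Int × Int) (c : Char) : Int × Int × Int :=
  let total := s.1 + pvMapping.getD c 0
  let mobs := if c != 'x' then s.2.1 + 1 else s.2.1
  let pos := s.2.2 + 1
  if pos == gs then
    let total := if mobs == 2 then total + (gs - 1)
                 else if mobs == 3 then total + 3 * (gs - 1)
                 else total
    (total, 0, 0)
  else (total, mobs, pos)

def pvFinal (gs : Int) (s : Int × Int × Int) : Int :=
  if s.2.2 != 0 then
    if s.2.1 == 2 then s.1 + (gs - 1)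
    else if s.2.1 == 3 then s.1 + 3 * (gs - 1)
    else s.1
  else s.1

lemma part2_alt_eq (inp : String) (gs : Int) :
    part2_alt inp gs = pvFinal gs (inp.toList.foldl (pvStep gs) (0, 0, 0)) := rfl

-- the bonus added for a group with m non-'x' mobs
def pvBonus (gs m : Int) : Int :=
  if m == 2 then gs - 1 else if m == 3 then 3 * (gs - 1) else 0

lemma bonus_add (gs T m : Int) :
    (if m == 2 then T + (gs - 1) else if m == 3 then T + 3 * (gs - 1) else T)
      = T + pvBonus gs m := by
  unfold pvBonus; split_ifs <;> ring

-- len(sub) - sub.count('x') counts the non-'x' characters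
lemma mobs_eq (sub : List Char) :
    (sub.length : Int) - (PySem.List.count sub 'x' : Int)
      = (sub.countP (fun c => c != 'x') : Int) := by
  induction sub with
  | nil => simp [PySem.List.count]
  | cons c rest ih =>
    simp only [PySem.List.count, List.count_cons, List.countP_cons, List.length_cons] at *
    by_cases h : c = 'x' <;> simp [h] <;> push_cast at * <;> omega

-- the full potion value of one group: character values plus the mob bonus
def pvGroupVal (gs : Int) (sub : List Char) : Int :=
  (sub.map (fun c => pvMapping.getD c 0)).sum
    + pvBonus gs ((sub.length : Int) - (PySem.List.count sub 'x' : Int))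

-- processing a partial group never hits the boundary: pure accumulation
lemma pvStep_partial (gs : Int) :
    ∀ (sub : List Char) (t m p : Int), 0 ≤ p → p + (sub.length : Int) < gs →
      sub.foldl (pvStep gs) (t, m, p)
        = (t + (sub.map (fun c => pvMapping.getD c 0)).sum,
           m + (sub.countP (fun c => c != 'x') : Int),
           p + (sub.length : Int)) := by
  intro sub
  induction sub with
  | nil => intro t m p h0 hlt; simp
  | cons c rest ih =>
    intro t m p h0 hlt
    simp only [List.length_cons] at hlt
    have hlt' : p + 1 + (rest.length : Int) < gs := by push_cast at hlt ⊢; omega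
    have hne : ((p + 1 : Int) == gs) = false := by
      simp only [beq_eq_false_iff_ne, ne_eq]; omega
    simp only [List.foldl_cons]
    rw [show pvStep gs (t, m, p) c
        = (t + pvMapping.getD c 0, (if c != 'x' then m + 1 else m), p + 1) from by
      simp [pvStep, hne]]
    rw [ih _ _ _ (by omega) hlt']
    refine Prod.ext ?_ (Prod.ext ?_ ?_)
    · simp; ring
    · simp only [List.countP_cons]
      by_cases h : c = 'x' <;> simp [h] <;> push_cast <;> ring
    · simp; push_cast; ring

-- processing one complete group from a fresh state: value + bonus, state reset
lemma pvStep_full (gs : Int) (sub : List Char) (t : Int)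
    (hlen : (sub.length : Int) = gs) (hpos : 0 < gs) :
    sub.foldl (pvStep gs) (t, 0, 0)
      = (t + (sub.map (fun c => pvMapping.getD c 0)).sum
           + pvBonus gs (sub.countP (fun c => c != 'x') : Int), 0, 0) := by
  obtain rfl | ⟨ys, c, rfl⟩ := sub.eq_nil_or_concat
  · simp only [List.length_nil, Nat.cast_zero] at hlen; omega
  · simp only [List.concat_eq_append] at hlen ⊢
    have hys : (0 : Int) + (ys.length : Int) < gs := by
      simp only [List.length_append, List.length_singleton] at hlen; push_cast at hlen ⊢; omega
    rw [List.foldl_append, pvStep_partial gs ys t 0 0 le_rfl hys]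
    have hb : (((ys.length : Int) + 0 + 1) == gs) = true := by
      simp only [List.length_append, List.length_singleton] at hlen
      simp only [beq_iff_eq]; push_cast at hlen ⊢; omega
    simp only [List.foldl_cons, List.foldl_nil]
    rw [show pvStep gs (t + (ys.map (fun c => pvMapping.getD c 0)).sum,
          (0 : Int) + (ys.countP (fun c => c != 'x') : Int), (0 : Int) + (ys.length : Int)) c
        = (t + (ys.map (fun c => pvMapping.getD c 0)).sum + pvMapping.getD c 0
             + pvBonus gs (if c != 'x' then (0 : Int) + (ys.countP (fun c => c != 'x') : Int) + 1
                           else (0 : Int) + (ys.countP (fun c => c != 'x') : Int)), 0, 0) from by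
      simp only [pvStep]
      rw [show ((0 : Int) + (ys.length : Int) + 1) = ((ys.length : Int) + 0 + 1) from by ring]
      simp only [hb, if_true, bonus_add]]
    refine Prod.ext ?_ rfl
    simp only [List.map_append, List.sum_append, List.map_cons, List.map_nil,
      List.sum_cons, List.sum_nil, List.countP_append, List.countP_cons, List.countP_nil]
    by_cases h : c = 'x' <;> simp [h] <;> push_cast <;> ring

-- step-g analogue of pyRange_one_cons: peel the first group start off range(0, n, g)
lemma pyRange_pos_cons (n g : Nat) (hg : 0 < g) (hn : 0 < n) :
    PySem.List.pyRange 0 (n : Int) (g : Int) =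
      0 :: (PySem.List.pyRange 0 ((n - g : Nat) : Int) (g : Int)).map (· + (g : Int)) := by
  have hgz : (0 : Int) < (g : Int) := by exact_mod_cast hg
  rw [PySem.List.pyRange_of_pos _ _ hgz, PySem.List.pyRange_of_pos _ _ hgz]
  have hcount : ((n : Int) - 0 + g - 1) / g = ((n - 1) / g : Nat) + 1 := by
    have h1 : ((n : Int) - 0 + g - 1) = ((n - 1 + g : Nat) : Int) := by push_cast; omega
    rw [h1]
    have : (n - 1 + g) / g = (n - 1) / g + 1 := Nat.add_div_right _ hg
    rw [show ((n - 1 + g : Nat) : Int) / (g : Int) = (((n - 1 + g) / g : Nat) : Int) from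
      (Int.natCast_ediv _ _).symm, this]
    push_cast; ring
  by_cases hng : g < n
  · have hpos2 : (0 : Int) < ((n - g : Nat) : Int) := by
      have : 0 < n - g := by omega
      exact_mod_cast this
    rw [if_pos (by omega : (0:Int) < (n:Int)), if_pos (by omega : (0:Int) < ((n - g : Nat) : Int))]
    have hcount2 : (((n - g : Nat) : Int) - 0 + g - 1) / g = ((n - 1) / g : Nat) := by
      have h1 : (((n - g : Nat) : Int) - 0 + g - 1) = ((n - 1 : Nat) : Int) := by omega
      rw [h1]
      exact_mod_cast (Int.natCast_ediv (n - 1) g).symm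
    rw [hcount, hcount2]
    generalize (n - 1) / g = q
    rw [show ((q : Int) + 1).toNat = q + 1 from by omega]
    rw [show ((q : Int) : Int).toNat = q from by omega]
    rw [List.range_succ_eq_map]
    simp only [List.map_map, List.map_cons]
    simp
    intro a _
    ring
  · have hle : n - g = 0 := by omega
    rw [hle]
    rw [if_pos (by exact_mod_cast hn : (0:Int) < (n:Int)), if_neg (by simp : ¬ (0:Int) < ((0:Nat) : Int))]
    have hdiv : (n - 1) / g = 0 := Nat.div_eq_of_lt (by omega)
    rw [hcount, hdiv]
    simp

-- peel the first group off the per-group sum: any per-slice value F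
lemma groupSum_peel (g : Nat) (hg : 0 < g) (F : List Char → Int) (cs : List Char)
    (hn : 0 < cs.length) :
    ((PySem.List.pyRange 0 (cs.length : Int) (g : Int)).map
        (fun i => F (PySem.List.slice cs (some i) (some (i + (g : Int)))))).sum
      = F (cs.take g)
        + ((PySem.List.pyRange 0 ((cs.drop g).length : Int) (g : Int)).map
            (fun i => F (PySem.List.slice (cs.drop g) (some i) (some (i + (g : Int)))))).sum := by
  rw [pyRange_pos_cons cs.length g hg hn]
  rw [List.map_cons, List.map_map, List.sum_cons]
  have hfirst : PySem.List.slice cs (some 0) (some (0 + (g : Int))) = cs.take g := by simp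
  rw [hfirst]
  have hdroplen : (cs.drop g).length = cs.length - g := List.length_drop
  congr 1
  rw [hdroplen]
  apply congrArg
  apply List.map_congr_left
  intro j hj
  have hj0 : 0 ≤ j :=
    ((PySem.List.mem_pyRange_iff_of_pos (by exact_mod_cast hg) j).mp hj).1
  obtain ⟨k, rfl⟩ : ∃ k : Nat, j = (k : Int) := ⟨j.toNat, by omega⟩
  simp only [Function.comp]
  rw [PySem.List.slice_natCast_add (cs.drop g) k g,
      show ((k : Int) + (g : Int)) = ((k + g : Nat) : Int) from by push_cast; ring,
      PySem.List.slice_natCast_add cs (k + g) g]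
  rw [List.drop_drop, Nat.add_comm k g]

-- B's machine computes the per-group sum (the invariant, by strong induction on length)
lemma pvB_main (gs : Int) (g : Nat) (hg : 0 < g) (hcast : (g : Int) = gs) :
    ∀ (n : Nat) (cs : List Char) (t : Int), cs.length = n →
      pvFinal gs (cs.foldl (pvStep gs) (t, 0, 0))
        = t + ((PySem.List.pyRange 0 (cs.length : Int) gs).map
            (fun i => pvGroupVal gs (PySem.List.slice cs (some i) (some (i + gs))))).sum := by
  intro n
  induction n using Nat.strong_induction_on with
  | _ n ih =>
    intro cs t hlen
    subst hlen
    subst hcast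
    rcases Nat.eq_zero_or_pos cs.length with h0 | hpos
    · have : cs = [] := List.length_eq_zero_iff.mp h0
      subst this
      simp [pvFinal, PySem.List.pyRange_of_pos 0 0 (by exact_mod_cast hg : (0:Int) < (g:Int))]
    · rw [groupSum_peel g hg (pvGroupVal (g : Int)) cs hpos]
      by_cases hsmall : cs.length < g
      · -- one short final group: the stream never resets, the tail fix-up adds the bonus
        have htake : cs.take g = cs := List.take_of_length_le (by omega)
        have hdrop : cs.drop g = [] := List.drop_eq_nil_of_le (by omega)
        rw [htake, hdrop]
        rw [pvStep_partial (g : Int) cs t 0 0 le_rfl (by push_cast; omega)]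
        have hne : (((0 : Int) + (cs.length : Int)) != 0) = true := by
          simp only [bne_iff_ne, ne_eq]; push_cast; omega
        simp only [pvFinal, hne, if_true]
        rw [bonus_add]
        rw [show PySem.List.pyRange 0 ((([] : List Char).length : Int)) (g : Int) = [] from by
          simp [PySem.List.pyRange_of_pos 0 0 (by exact_mod_cast hg : (0:Int) < (g:Int))]]
        simp only [pvGroupVal, mobs_eq, List.map_nil, List.sum_nil]
        ring
      · -- a complete first group, then recurse on the rest
        have hfull : (cs.take g).length = g := by
          rw [List.length_take]; omega
        rw [show cs.foldl (pvStep (g : Int)) (t, 0, 0)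
            = (cs.take g ++ cs.drop g).foldl (pvStep (g : Int)) (t, 0, 0) from by
          rw [List.take_append_drop]]
        rw [List.foldl_append]
        rw [pvStep_full _ (cs.take g) t (by rw [hfull]) (by omega)]
        rw [ih (cs.drop g).length (by simp [List.length_drop]; omega) (cs.drop g) _ rfl]
        simp only [pvGroupVal, mobs_eq]
        ring

-- ===== VERDICT (by name: the statement is the Claim_ definition above) =====
theorem part2_spec : Claim_equal_part2 := by
  intro inp gs _ hpre
  obtain ⟨hgs, -⟩ := hpre
  unfold Spec_part2
  set cs := inp.toList with hcs
  set g : Nat := gs.toNat with hgdef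
  have hgcast : (g : Int) = gs := by omega
  have hg : 0 < g := by omega
  -- A's fold is the sum of per-group values
  have hA : part2 inp gs
      = 0 + ((PySem.List.pyRange 0 (cs.length : Int) gs).map
          (fun i => pvGroupVal gs (PySem.List.slice cs (some i) (some (i + gs))))).sum := by
    unfold part2
    rw [← PySem.List.foldl_add (PySem.List.pyRange 0 (cs.length : Int) gs)
      (fun i => pvGroupVal gs (PySem.List.slice cs (some i) (some (i + gs)))) 0]
    apply PySem.List.foldl_congr_mem
    intro acc i _
    simp only [pvGroupVal, pvBonus]
    split_ifs with h2 h3 h3 <;> simp_all <;> ring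
  rw [hA, part2_alt_eq, pvB_main gs g hg hgcast cs.length cs 0 rfl]
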